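-- pv_equiv track=rewrite | github.com/Twinkle010/DSA_with_python_practice | dsa python files/2. lists/findPairs.py | findPairsInAllOrders
-- ===== SOURCE A (Python) =====
-- def findPairsInAllOrders(my_list, target):
--     res_pairs = []
--     for i in range(0,len(my_list)):
--         for j in range(i+1,len(my_list)):
--             if my_list[i] + my_list[j] == target:
--                 res_pairs.append(tuple([my_list[i],my_list[j]]))
--                 res_pairs.append(tuple([my_list[j],my_list[i]]))
--
--
--     return res_pairs
-- ===== SOURCE B (Python) =====
-- def findPairsInAllOrders(my_list, target):
--     positions = {}
--     for idx, v in enumerate(my_list):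
--         positions.setdefault(v, []).append(idx)
--     res_pairs = []
--     for i, v in enumerate(my_list):
--         for j in positions.get(target - v, []):
--             if j > i:
--                 res_pairs.append((v, my_list[j]))
--                 res_pairs.append((my_list[j], v))
--     return res_pairs
-- ===== Notes on version B (the rewrite author's own statement) =====
-- stated objective: faster
-- what changed: Replaces the nested O(n^2) index scan by a one-pass dict mapping each value to its (increasing) index list, then for each i emits pairs only for the stored indices of target - my_list[i] that lie after i.
import Mathlib
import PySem

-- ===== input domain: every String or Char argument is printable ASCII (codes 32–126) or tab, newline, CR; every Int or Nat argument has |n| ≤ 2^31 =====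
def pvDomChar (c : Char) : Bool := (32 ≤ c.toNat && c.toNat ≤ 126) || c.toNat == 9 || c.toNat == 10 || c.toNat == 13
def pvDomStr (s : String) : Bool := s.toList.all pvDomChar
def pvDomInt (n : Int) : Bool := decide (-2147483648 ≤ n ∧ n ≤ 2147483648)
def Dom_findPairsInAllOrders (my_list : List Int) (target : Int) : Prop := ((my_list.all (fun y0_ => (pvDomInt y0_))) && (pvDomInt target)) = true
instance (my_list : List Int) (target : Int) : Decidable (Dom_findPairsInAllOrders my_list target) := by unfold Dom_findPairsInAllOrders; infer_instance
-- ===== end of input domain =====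

-- B replaces A's quadratic nested index scan by a dict value → index list built once,
-- emitting for each i only the stored indices of the complement that lie after i (objective: faster).

-- ===== PORT A =====
def findPairsInAllOrders (my_list : List Int) (target : Int) : List (List Int) :=
  (PySem.List.pyRange 0 my_list.length 1).foldl (fun res i =>
    (PySem.List.pyRange (i + 1) my_list.length 1).foldl (fun res j =>
      if PySem.List.pyGetD my_list i 0 + PySem.List.pyGetD my_list j 0 = target then
        res ++ [[PySem.List.pyGetD my_list i 0, PySem.List.pyGetD my_list j 0],
                [PySem.List.pyGetD my_list j 0, PySem.List.pyGetD my_list i 0]]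
      else res) res) []

-- ===== PORT B =====
def findPairsInAllOrders_alt (my_list : List Int) (target : Int) : List (List Int) :=
  let positions : PySem.Dict Int (List Int) :=
    (PySem.List.enumerate my_list 0).foldl
      (fun d p => d.modify p.2 [] (fun xs => xs ++ [p.1])) PySem.Dict.empty
  (PySem.List.enumerate my_list 0).foldl (fun res p =>
    (positions.getD (target - p.2) []).foldl (fun res j =>
      if p.1 < j then
        res ++ [[p.2, PySem.List.pyGetD my_list j 0],
                [PySem.List.pyGetD my_list j 0, p.2]]
      else res) res) []

-- ===== PRECONDITION & SPEC =====
def Spec_findPairsInAllOrders (my_list : List Int) (target : Int) (out : List (List Int)) : Prop := out = findPairsInAllOrders_alt my_list target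
instance (my_list : List Int) (target : Int) (out : List (List Int)) : Decidable (Spec_findPairsInAllOrders my_list target out) := by unfold Spec_findPairsInAllOrders; infer_instance

-- ===== CLAIM (what is proved, stated in full; the proofs are below) =====
def Claim_equal_findPairsInAllOrders : Prop := ∀ (my_list : List Int) (target : Int), Dom_findPairsInAllOrders my_list target → Spec_findPairsInAllOrders my_list target (findPairsInAllOrders my_list target)

-- ===== LEMMAS AND PROOFS =====

-- a nested 'for … if cond: append 2 items' fold written as a flatMap over the filtered list
theorem pvFoldPairs {α : Type} (js : List α) (p : α → Prop) [DecidablePred p]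
    (g : α → List (List Int)) (res : List (List Int)) :
    js.foldl (fun res j => if p j then res ++ g j else res) res
      = res ++ (js.filter (fun j => decide (p j))).flatMap g := by
  rw [PySem.List.foldl_ite_eq_foldl_filter, PySem.List.foldl_append_eq_flatMap]

-- the position dict: its value at v is the list of indices of v, in increasing order
theorem pvPositions (l : List Int) (v : Int) :
    (((PySem.List.enumerate l 0).foldl
        (fun d p => d.modify p.2 [] (fun xs => xs ++ [p.1]))
        (PySem.Dict.empty : PySem.Dict Int (List Int))).getD v [])
      = (PySem.List.pyRange 0 l.length 1).filter
          (fun j => PySem.List.pyGetD l j 0 == v) := by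
  have hmap : (PySem.List.enumerate l 0).foldl
        (fun d p => d.modify p.2 [] (fun xs => xs ++ [p.1]))
        (PySem.Dict.empty : PySem.Dict Int (List Int))
      = ((PySem.List.enumerate l 0).map Prod.swap).foldl
        (fun d q => d.modify q.1 [] (fun xs => xs ++ [q.2])) PySem.Dict.empty := by
    rw [List.foldl_map]
    simp [Prod.swap]
  rw [hmap, PySem.Dict.getD_foldl_modify_append]
  rw [PySem.List.enumerate_eq_map_pyRange l (0 : Int)]
  simp [List.map_map, List.filter_map, Function.comp_def]

theorem pvPositions' (l : List Int) (v : Int) :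
    ((((PySem.List.pyRange 0 (PySem.List.len l) 1).map
          (fun j => (j, PySem.List.pyGetD l j 0))).foldl
        (fun d p => d.modify p.2 [] (fun xs => xs ++ [p.1]))
        (PySem.Dict.empty : PySem.Dict Int (List Int))).getD v [])
      = (PySem.List.pyRange 0 l.length 1).filter
          (fun j => PySem.List.pyGetD l j 0 == v) := by
  rw [← PySem.List.enumerate_eq_map_pyRange l 0]
  exact pvPositions l v

theorem findPairsInAllOrders_eq (l : List Int) (t : Int) :
    findPairsInAllOrders l t = findPairsInAllOrders_alt l t := by
  unfold findPairsInAllOrders findPairsInAllOrders_alt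
  dsimp only
  rw [PySem.List.enumerate_eq_map_pyRange l 0, List.foldl_map]
  dsimp only
  refine Eq.trans
    (Eq.trans
      (PySem.List.foldl_congr_mem _ _
        (fun res i => res ++
          ((PySem.List.pyRange (i + 1) l.length 1).filter
              (fun j => decide (PySem.List.pyGetD l i 0 + PySem.List.pyGetD l j 0 = t))).flatMap
            (fun j => [[PySem.List.pyGetD l i 0, PySem.List.pyGetD l j 0],
                       [PySem.List.pyGetD l j 0, PySem.List.pyGetD l i 0]]))
        [] (fun acc i _ => pvFoldPairs _ _ _ acc))
      (PySem.List.foldl_append_eq_flatMap _ _ []))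
    (Eq.trans ?_
      (Eq.trans
        (PySem.List.foldl_append_eq_flatMap _ _ []).symm
        (PySem.List.foldl_congr_mem _ _
          (fun res i => res ++
            (((((PySem.List.pyRange 0 (PySem.List.len l) 1).map
                  (fun j => (j, PySem.List.pyGetD l j 0))).foldl
                (fun d p => d.modify p.2 [] (fun xs => xs ++ [p.1]))
                (PySem.Dict.empty : PySem.Dict Int (List Int))).getD
                  (t - PySem.List.pyGetD l i 0) []).filter
              (fun j => decide (i < j))).flatMap
            (fun j => [[PySem.List.pyGetD l i 0, PySem.List.pyGetD l j 0],
                       [PySem.List.pyGetD l j 0, PySem.List.pyGetD l i 0]]))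
          [] (fun acc i _ => (pvFoldPairs _ _ _ acc))).symm))
  rw [List.nil_append, List.nil_append]
  apply List.flatMap_congr
  intro i hi
  apply congrArg (List.flatMap _)
  rw [pvPositions']
  rw [List.filter_filter]
  have hi' : 0 ≤ i ∧ i < (l.length : Int) := PySem.List.mem_pyRange_one.mp hi
  rw [PySem.List.pyRange_one_append 0 (i + 1) l.length (by omega) (by omega)]
  rw [List.filter_append]
  have h1 : (PySem.List.pyRange 0 (i + 1) 1).filter
      (fun j => decide (i < j) && (PySem.List.pyGetD l j 0 == t - PySem.List.pyGetD l i 0)) = [] := by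
    apply List.filter_eq_nil_iff.mpr
    intro j hj
    have := PySem.List.mem_pyRange_one.mp hj
    simp only [Bool.and_eq_true, decide_eq_true_eq]
    omega
  rw [h1, List.nil_append]
  symm
  apply List.filter_congr
  intro j hj
  have := PySem.List.mem_pyRange_one.mp hj
  have hji : i < j := by omega
  simp only [hji, decide_true, Bool.true_and]
  rw [Bool.eq_iff_iff]
  simp only [beq_iff_eq, decide_eq_true_eq]
  omega

-- ===== VERDICT (by name: the statement is the Claim_ definition above) =====
theorem findPairsInAllOrders_spec : Claim_equal_findPairsInAllOrders := by
  intro l t _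
  unfold Spec_findPairsInAllOrders
  exact findPairsInAllOrders_eq l t
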